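-- pv_equiv track=rewrite | github.com/vihaanmathur/ai | crossword.py | check_illegal
-- ===== SOURCE A (Python) =====
-- BLOCKCHAR = '#'
--
-- OPENCHAR = '-'
--
-- PROTECTEDCHAR = '~'
--
-- def area_fill(board_list, sp, width):
--     if sp < 0 or sp >= len(board_list): return board_list
--     if (board_list[sp] == OPENCHAR) or (board_list[sp] == PROTECTEDCHAR):
--         board_list[sp] = '?'
--         if sp % width != 0 and sp-1 >= 0:
--             area_fill(board_list, sp-1, width)
--         if sp not in range(0, width) and sp-width >= 0:
--             area_fill(board_list, sp-width, width)
--         if sp % width != width-1 and sp+1 < len(board_list):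
--             area_fill(board_list, sp+1, width)
--         if sp not in range(len(board_list) - width, len(board_list)) and sp+width < len(board_list):
--             area_fill(board_list, sp+width, width)
--     return board_list
--
-- def check_illegal(xword, width, num_of_blocks, totalnum):
--     #if theres more blocks in board then initially set, board doesnt connect, or if theres short of a sequence of protected characters
--     if num_of_blocks > totalnum or xword.count(OPENCHAR) == 0:
--         return True
--     count, startpos = 0, 0
--     while startpos < len(xword) and xword[startpos] == BLOCKCHAR:
--         startpos += 1
--     board_list = list(xword)
--     board = ''.join(area_fill(board_list, startpos, width))
--     count = len([x for x in range(len(board)) if board[x] == '?'])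
--     count2 = xword.count(OPENCHAR) + xword.count(PROTECTEDCHAR)
--     return count == count2
-- ===== SOURCE B (Python) =====
-- BLOCKCHAR = '#'
--
-- OPENCHAR = '-'
--
-- PROTECTEDCHAR = '~'
--
-- def check_illegal(xword, width, num_of_blocks, totalnum):
--     if num_of_blocks > totalnum or xword.count(OPENCHAR) == 0:
--         return True
--     n = len(xword)
--     startpos = 0
--     while startpos < n and xword[startpos] == BLOCKCHAR:
--         startpos += 1
--     board = list(xword)
--     stack = [startpos]
--     while stack:
--         sp = stack.pop()
--         if 0 <= sp < n and board[sp] in (OPENCHAR, PROTECTEDCHAR):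
--             board[sp] = '?'
--             # push reversed (down, right, up, left) so pops visit left, up, right, down
--             if sp not in range(n - width, n) and sp + width < n:
--                 stack.append(sp + width)
--             if sp % width != width - 1 and sp + 1 < n:
--                 stack.append(sp + 1)
--             if sp not in range(0, width) and sp - width >= 0:
--                 stack.append(sp - width)
--             if sp % width != 0 and sp - 1 >= 0:
--                 stack.append(sp - 1)
--     count = board.count('?')
--     return count == xword.count(OPENCHAR) + xword.count(PROTECTEDCHAR)
-- ===== Notes on version B (the rewrite author's own statement) =====
-- stated objective: alternative
-- what changed: Replaced the recursive depth-first area_fill with an iterative flood fill driven by an explicit stack (pop a cell, mark it, push the guarded neighbours), and counted marked cells with board.count('?') instead of a range comprehension.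
import Mathlib
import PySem

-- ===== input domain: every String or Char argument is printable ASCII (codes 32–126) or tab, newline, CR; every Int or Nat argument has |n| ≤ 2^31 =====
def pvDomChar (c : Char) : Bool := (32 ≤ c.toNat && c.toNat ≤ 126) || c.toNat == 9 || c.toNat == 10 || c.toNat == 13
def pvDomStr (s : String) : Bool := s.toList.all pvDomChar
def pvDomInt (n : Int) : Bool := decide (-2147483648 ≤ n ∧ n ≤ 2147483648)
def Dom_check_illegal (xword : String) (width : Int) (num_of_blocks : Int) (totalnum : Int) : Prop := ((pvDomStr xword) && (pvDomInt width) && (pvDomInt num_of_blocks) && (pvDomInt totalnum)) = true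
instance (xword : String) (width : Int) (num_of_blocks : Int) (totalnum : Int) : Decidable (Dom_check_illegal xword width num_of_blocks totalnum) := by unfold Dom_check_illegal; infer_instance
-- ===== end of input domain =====

-- B replaces A's recursive `area_fill` with an iterative flood fill over an explicit stack
-- (same guards, same marking); alternative decomposition, no speed claim.

-- cell is OPENCHAR or PROTECTEDCHAR
def pvOpen (c : Char) : Bool := c == '-' || c == '~'

-- number of still-fillable cells (termination measure for both fills)
def pvOpenCnt (b : List Char) : Nat := b.countP pvOpen

-- the `while startpos < len and xword[startpos] == BLOCKCHAR` loop (identical in A and B)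
def pvStartpos (l : List Char) : Nat :=
  match l with
  | [] => 0
  | c :: t => if c = '#' then pvStartpos t + 1 else 0

-- ===== PORT A =====
-- area_fill, with a fuel argument as totality device (fuel pvOpenCnt b + 1 always suffices,
-- proved below; the computation is A's, step for step)
def areaFillF : Nat → List Char → Int → Int → List Char
  | 0, b, _, _ => b
  | f + 1, b, sp, width =>
    if sp < 0 ∨ sp ≥ (b.length : Int) then b
    else if pvOpen (b.getD sp.toNat ' ') then
      let b1 := b.set sp.toNat '?'
      let b2 := if PySem.Int.mod sp width ≠ 0 ∧ sp - 1 ≥ 0 then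
                  areaFillF f b1 (sp - 1) width else b1
      let b3 := if ¬(0 ≤ sp ∧ sp < width) ∧ sp - width ≥ 0 then
                  areaFillF f b2 (sp - width) width else b2
      let b4 := if PySem.Int.mod sp width ≠ width - 1 ∧ sp + 1 < (b.length : Int) then
                  areaFillF f b3 (sp + 1) width else b3
      let b5 := if ¬((b.length : Int) - width ≤ sp ∧ sp < (b.length : Int)) ∧ sp + width < (b.length : Int) then
                  areaFillF f b4 (sp + width) width else b4
      b5
    else b

def areaFill (b : List Char) (sp width : Int) : List Char :=
  areaFillF (pvOpenCnt b + 1) b sp width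

def check_illegal (xword : String) (width : Int) (num_of_blocks : Int) (totalnum : Int) : Bool :=
  if num_of_blocks > totalnum || PySem.Str.count xword "-" == 0 then true
  else
    let l := xword.toList
    let startpos := pvStartpos l
    let board := areaFill l (startpos : Int) width
    let count := ((List.range board.length).filter (fun x => board.getD x ' ' == '?')).length
    let count2 := PySem.Str.count xword "-" + PySem.Str.count xword "~"
    decide (count = count2)

-- ===== PORT B =====
-- the four guarded pushes of Source B, in pop order left, up, right, down
def pvNbrs (sp width n : Int) : List Int :=
  (if PySem.Int.mod sp width ≠ 0 ∧ sp - 1 ≥ 0 then [sp - 1] else []) ++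
  (if ¬(0 ≤ sp ∧ sp < width) ∧ sp - width ≥ 0 then [sp - width] else []) ++
  (if PySem.Int.mod sp width ≠ width - 1 ∧ sp + 1 < n then [sp + 1] else []) ++
  (if ¬(n - width ≤ sp ∧ sp < n) ∧ sp + width < n then [sp + width] else [])

-- used by fillLoop's termination proof
theorem pvOpenCnt_set_lt (l : List Char) (i : Nat) (h : i < l.length)
    (hp : pvOpen (l.getD i ' ') = true) : pvOpenCnt (l.set i '?') < pvOpenCnt l := by
  induction l generalizing i with
  | nil => simp at h
  | cons c t ih =>
    cases i with
    | zero =>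
      simp only [List.getD_cons_zero] at hp
      have hp' : c = '-' ∨ c = '~' := by simpa [pvOpen] using hp
      simp only [List.set_cons_zero, pvOpenCnt, List.countP_cons]
      rcases hp' with h' | h' <;> simp [pvOpen, h']
    | succ j =>
      simp only [List.getD_cons_succ] at hp
      have hlt := ih j (by simpa using h) hp
      simp only [pvOpenCnt] at hlt
      simp only [List.set_cons_succ, pvOpenCnt, List.countP_cons]
      exact Nat.add_lt_add_right hlt _

-- `while stack:` loop of Source B (Lean list head = Python list end, where .pop()/.append work)
def fillLoop (b : List Char) (stack : List Int) (width : Int) : List Char :=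
  match stack with
  | [] => b
  | sp :: rest =>
    if h : 0 ≤ sp ∧ sp < (b.length : Int) ∧ pvOpen (b.getD sp.toNat ' ') then
      fillLoop (b.set sp.toNat '?') (pvNbrs sp width (b.length : Int) ++ rest) width
    else fillLoop b rest width
termination_by (pvOpenCnt b, stack.length)
decreasing_by
  · exact Prod.Lex.left _ _ (pvOpenCnt_set_lt b sp.toNat (by omega) h.2.2)
  · exact Prod.Lex.right _ (by simp only [List.length_cons]; omega)

def check_illegal_alt (xword : String) (width : Int) (num_of_blocks : Int) (totalnum : Int) : Bool :=
  if num_of_blocks > totalnum || PySem.Str.count xword "-" == 0 then true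
  else
    let l := xword.toList
    let startpos := pvStartpos l
    let board := fillLoop l [(startpos : Int)] width
    let count := board.count '?'
    let count2 := PySem.Str.count xword "-" + PySem.Str.count xword "~"
    decide (count = count2)

-- ===== PRECONDITION & SPEC =====
-- Pre_ excludes exactly the inputs on which Python A raises ZeroDivisionError:
-- width == 0 while the fill actually starts (no early return and the first
-- non-'#' character is '-' or '~', so `sp % width` is evaluated).
def Pre_check_illegal (xword : String) (width : Int) (num_of_blocks : Int) (totalnum : Int) : Prop :=
  width ≠ 0 ∨ num_of_blocks > totalnum ∨ PySem.Str.count xword "-" = 0 ∨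
    ((xword.toList.dropWhile (fun c => c == '#')).head?.all (fun c => ¬ pvOpen c)) = true
instance (xword : String) (width : Int) (num_of_blocks : Int) (totalnum : Int) : Decidable (Pre_check_illegal xword width num_of_blocks totalnum) := by unfold Pre_check_illegal; infer_instance

def pvWitness_check_illegal : String × Int × Int × Int := ("#-~-", 2, 1, 3)

def Spec_check_illegal (xword : String) (width : Int) (num_of_blocks : Int) (totalnum : Int) (out : Bool) : Prop := out = check_illegal_alt xword width num_of_blocks totalnum
instance (xword : String) (width : Int) (num_of_blocks : Int) (totalnum : Int) (out : Bool) : Decidable (Spec_check_illegal xword width num_of_blocks totalnum out) := by unfold Spec_check_illegal; infer_instance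

-- ===== CLAIM (what is proved, stated in full; the proofs are below) =====
def Claim_equal_check_illegal : Prop := ∀ (xword : String) (width : Int) (num_of_blocks : Int) (totalnum : Int), Dom_check_illegal xword width num_of_blocks totalnum → Pre_check_illegal xword width num_of_blocks totalnum → Spec_check_illegal xword width num_of_blocks totalnum (check_illegal xword width num_of_blocks totalnum)

-- ===== LEMMAS AND PROOFS =====

-- proof-only characterisation of one fill step (guard + neighbour fold)
def pvFillStep (b : List Char) (sp width : Int) : List Char :=
  if (¬(sp < 0 ∨ sp ≥ (b.length : Int))) ∧ pvOpen (b.getD sp.toNat ' ') then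
    List.foldl (fun bb n => areaFill bb n width) (b.set sp.toNat '?')
      (pvNbrs sp width (b.length : Int))
  else b

theorem pvOpenCnt_set_le (l : List Char) (i : Nat) :
    pvOpenCnt (l.set i '?') ≤ pvOpenCnt l := by
  induction l generalizing i with
  | nil => simp [pvOpenCnt]
  | cons c t ih =>
    cases i with
    | zero =>
      simp only [List.set_cons_zero, pvOpenCnt, List.countP_cons]
      have h : pvOpen '?' = false := by decide
      rw [h]
      simp only [Bool.false_eq_true, if_false]
      split <;> omega
    | succ j =>
      have h := ih j
      simp only [pvOpenCnt] at h
      simp only [List.set_cons_succ, pvOpenCnt, List.countP_cons]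
      exact Nat.add_le_add_right h _

theorem areaFillF_cnt_le (f : Nat) (b : List Char) (sp width : Int) :
    pvOpenCnt (areaFillF f b sp width) ≤ pvOpenCnt b := by
  induction f generalizing b sp with
  | zero => exact le_refl _
  | succ f ih =>
    rw [areaFillF]
    split
    · exact le_refl _
    split
    · dsimp only
      have step : ∀ (c : Prop) [Decidable c] (bb : List Char) (n : Int),
          pvOpenCnt (if c then areaFillF f bb n width else bb) ≤ pvOpenCnt bb := by
        intro c _ bb n
        split
        · exact ih bb n
        · exact le_refl _
      refine le_trans (step _ _ _) ?_
      refine le_trans (step _ _ _) ?_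
      refine le_trans (step _ _ _) ?_
      refine le_trans (step _ _ _) ?_
      exact pvOpenCnt_set_le b sp.toNat
    · exact le_refl _

theorem areaFill_cnt_le (b : List Char) (sp width : Int) :
    pvOpenCnt (areaFill b sp width) ≤ pvOpenCnt b :=
  areaFillF_cnt_le _ b sp width

theorem foldl_if_singleton {α β : Type} (g : β → α → β) (x : β) (c : Prop) [Decidable c]
    (a : α) (l : List α) :
    List.foldl g x ((if c then [a] else []) ++ l) = List.foldl g (if c then g x a else x) l := by
  split <;> simp

theorem foldl_if_singleton' {α β : Type} (g : β → α → β) (x : β) (c : Prop) [Decidable c]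
    (a : α) :
    List.foldl g x (if c then [a] else []) = if c then g x a else x := by
  split <;> simp

theorem areaFillF_eq_step (width : Int) (f : Nat) : ∀ (b : List Char) (sp : Int),
    pvOpenCnt b < f → areaFillF f b sp width = pvFillStep b sp width := by
  induction f using Nat.strong_induction_on with
  | _ f ih =>
    intro b sp hf
    cases f with
    | zero => omega
    | succ f' =>
      rw [areaFillF, pvFillStep]
      by_cases hg : sp < 0 ∨ sp ≥ (b.length : Int)
      · rw [if_pos hg, if_neg (by tauto)]
      by_cases ho : pvOpen (b.getD sp.toNat ' ') = true
      · rw [if_neg hg, if_pos ho, if_pos ⟨hg, ho⟩]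
        have hlen : sp.toNat < b.length := by push Not at hg; omega
        have hb1 : pvOpenCnt (b.set sp.toNat '?') < pvOpenCnt b :=
          pvOpenCnt_set_lt b sp.toNat hlen ho
        have conv : ∀ (bb : List Char) (n : Int), pvOpenCnt bb < pvOpenCnt b →
            areaFillF f' bb n width = areaFill bb n width := by
          intro bb n hbb
          rw [ih f' (by omega) bb n (by omega), areaFill,
            ih (pvOpenCnt bb + 1) (by omega) bb n (by omega)]
        have estep : ∀ (c : Prop) [Decidable c] (bb : List Char) (n : Int),
            pvOpenCnt bb < pvOpenCnt b →
            (if c then areaFillF f' bb n width else bb) = (if c then areaFill bb n width else bb) := by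
          intro c _ bb n hbb
          split
          · exact conv bb n hbb
          · rfl
        have cstep : ∀ (c : Prop) [Decidable c] (bb : List Char) (n : Int),
            pvOpenCnt bb < pvOpenCnt b →
            pvOpenCnt (if c then areaFill bb n width else bb) < pvOpenCnt b := by
          intro c _ bb n hbb
          split
          · exact lt_of_le_of_lt (areaFill_cnt_le bb n width) hbb
          · exact hbb
        dsimp only
        simp only [pvNbrs, List.append_assoc, foldl_if_singleton, foldl_if_singleton']
        rw [estep (PySem.Int.mod sp width ≠ 0 ∧ sp - 1 ≥ 0) (b.set sp.toNat '?') (sp - 1) hb1]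
        set B1 := if PySem.Int.mod sp width ≠ 0 ∧ sp - 1 ≥ 0 then
            areaFill (b.set sp.toNat '?') (sp - 1) width else b.set sp.toNat '?' with hB1def
        have hB1 : pvOpenCnt B1 < pvOpenCnt b := by
          rw [hB1def]; exact cstep _ _ _ hb1
        rw [estep (¬(0 ≤ sp ∧ sp < width) ∧ sp - width ≥ 0) B1 (sp - width) hB1]
        set B2 := if ¬(0 ≤ sp ∧ sp < width) ∧ sp - width ≥ 0 then
            areaFill B1 (sp - width) width else B1 with hB2def
        have hB2 : pvOpenCnt B2 < pvOpenCnt b := by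
          rw [hB2def]; exact cstep _ _ _ hB1
        rw [estep (PySem.Int.mod sp width ≠ width - 1 ∧ sp + 1 < (b.length : Int)) B2 (sp + 1) hB2]
        set B3 := if PySem.Int.mod sp width ≠ width - 1 ∧ sp + 1 < (b.length : Int) then
            areaFill B2 (sp + 1) width else B2 with hB3def
        have hB3 : pvOpenCnt B3 < pvOpenCnt b := by
          rw [hB3def]; exact cstep _ _ _ hB2
        rw [estep (¬((b.length : Int) - width ≤ sp ∧ sp < (b.length : Int)) ∧
          sp + width < (b.length : Int)) B3 (sp + width) hB3]
      · rw [if_neg hg, if_neg ho, if_neg (by tauto)]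

theorem areaFill_eq_step (b : List Char) (sp width : Int) :
    areaFill b sp width = pvFillStep b sp width :=
  areaFillF_eq_step width (pvOpenCnt b + 1) b sp (Nat.lt_succ_self _)

theorem fillLoop_eq (b : List Char) (stack : List Int) (width : Int) :
    fillLoop b stack width = List.foldl (fun bb n => areaFill bb n width) b stack := by
  induction b, stack using fillLoop.induct width with
  | case1 b => rw [fillLoop, List.foldl_nil]
  | case2 b sp rest h ih =>
    rw [fillLoop, dif_pos h, ih, List.foldl_cons, List.foldl_append]
    congr 1
    rw [areaFill_eq_step, pvFillStep, if_pos]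
    exact ⟨by omega, h.2.2⟩
  | case3 b sp rest h ih =>
    rw [fillLoop, dif_neg h, ih, List.foldl_cons]
    congr 1
    rw [areaFill_eq_step, pvFillStep, if_neg]
    rintro ⟨h1, h2⟩
    exact h ⟨by omega, by omega, h2⟩

theorem count_filter_range (board : List Char) :
    ((List.range board.length).filter (fun x => board.getD x ' ' == '?')).length
      = board.count '?' := by
  have hm : (List.range board.length).map (fun i => board.getD i ' ') = board := by
    apply List.ext_getElem
    · simp
    · intro i h1 h2
      simp [List.getD_eq_getElem?_getD, List.getElem?_eq_getElem h2]
  rw [← List.countP_eq_length_filter]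
  conv_rhs => rw [List.count, ← hm, List.countP_map]
  rfl

-- ===== VERDICT (by name: the statement is the Claim_ definition above) =====
theorem check_illegal_spec : Claim_equal_check_illegal := by
  intro xword width num_of_blocks totalnum _ _
  unfold Spec_check_illegal check_illegal check_illegal_alt
  by_cases h : (num_of_blocks > totalnum || PySem.Str.count xword "-" == 0) = true
  · rw [if_pos h, if_pos h]
  · rw [if_neg h, if_neg h]
    dsimp only
    rw [fillLoop_eq, List.foldl_cons, List.foldl_nil, count_filter_range]
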